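-- pv_equiv track=rewrite | github.com/k4kTuS/AOC | Day13/day13.py | mirror_vertical
-- ===== SOURCE A (Python) =====
-- def mirror_vertical(grid, smudge=False):
--     full = len(grid[0][0])
--     half = full//2
--     for x in range(1, full):
--         diffs = 0
--         for f in grid:
--             if x <= half:
--                 left_slice = f[0][:x]
--                 right_slice = f[0][x:x+x]
--             else:
--                 left_slice = f[0][x-(full-x):x]
--                 right_slice = f[0][x:]
--             right_slice = right_slice[::-1]
--             for c in range(0, len(left_slice)):
--                 if left_slice[c] != right_slice[c]:
--                     diffs += 1
--         if diffs == (1 if smudge else 0):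
--             return x
--     return 0
-- ===== SOURCE B (Python) =====
-- def mirror_vertical(grid, smudge=False):
--     # Column-oriented rewrite: transpose the pattern once into column strings,
--     # then score each candidate axis as a sum of Hamming distances between
--     # paired columns.
--     full = len(grid[0][0])
--     if full < 2:
--         return 0  # no candidate axis exists
--     cols = [''.join(t) for t in zip(*(f[0] for f in grid))]
--     target = 1 if smudge else 0
--     for x in range(1, full):
--         lo = max(0, 2 * x - full)
--         diffs = sum(sum(c != d for c, d in zip(cols[j], cols[2 * x - 1 - j]))
--                     for j in range(lo, x))
--         if diffs == target:
--             return x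
--     return 0
-- ===== Notes on version B (the rewrite author's own statement) =====
-- stated objective: alternative
-- what changed: B transposes the pattern once into column strings and scores each candidate axis as a sum of Hamming distances between paired columns (zip-based), instead of A's per-row slicing, reversal and per-character index loop at every axis.
-- outside the precondition, e.g. on mirror_vertical([['abb'], ['abab']], False): A returns 2, B returns 0; on mirror_vertical([['aa'], ['a']], False): A raises IndexError, B raises IndexError
import Mathlib
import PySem

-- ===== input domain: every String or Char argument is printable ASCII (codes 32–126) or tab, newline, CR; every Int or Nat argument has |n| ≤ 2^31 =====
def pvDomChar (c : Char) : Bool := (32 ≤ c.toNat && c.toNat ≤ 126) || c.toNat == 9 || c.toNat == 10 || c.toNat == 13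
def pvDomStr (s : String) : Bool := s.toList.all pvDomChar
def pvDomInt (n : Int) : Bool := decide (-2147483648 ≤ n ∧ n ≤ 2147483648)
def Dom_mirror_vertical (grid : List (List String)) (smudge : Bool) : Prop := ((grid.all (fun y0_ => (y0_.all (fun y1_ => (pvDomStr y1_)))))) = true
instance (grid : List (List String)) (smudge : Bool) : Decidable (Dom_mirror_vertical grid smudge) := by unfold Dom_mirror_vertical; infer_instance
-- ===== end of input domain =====

-- B rewrites A column-wise: transpose once, score each axis as a sum of Hamming
-- distances between paired columns; alternative structure, same asymptotic cost.

-- ===== PORT A =====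
-- per-row body of A's outer loop: slices, reversal, inner index loop.
-- f[0][...] slices; outside Pre_ Python may raise IndexError in the inner loop
-- (right_slice shorter than left_slice): there the port counts `none ≠ some` as a diff.
def mvRowDiffA (x half full : Int) (s : List Char) (d : Int) : Int :=
  let lr := if x ≤ half then
      (PySem.List.slice s none (some x), PySem.List.slice s (some x) (some (x + x)))
    else
      (PySem.List.slice s (some (x - (full - x))) (some x), PySem.List.slice s (some x) none)
  let left := lr.1
  let right := lr.2.reverse   -- right_slice[::-1] is reverse (PySem.List.slice?_none_none_neg_one)
  (PySem.List.pyRange 0 (left.length : Int) 1).foldl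
    (fun d c => if PySem.List.pyGet? left c ≠ PySem.List.pyGet? right c then d + 1 else d) d

-- 'for x in range(1, full): … return x' / fall through to 'return 0'
def mvLoopA (grid : List (List String)) (smudge : Bool) (full half : Int) : List Int → Int
  | [] => 0
  | x :: xs =>
    let diffs := grid.foldl (fun d f => mvRowDiffA x half full (f.headD "").toList d) 0
    if diffs = (if smudge then (1 : Int) else 0) then x else mvLoopA grid smudge full half xs

def mirror_vertical (grid : List (List String)) (smudge : Bool) : Int :=
  -- len(grid[0][0]); grid[0] / f[0] raise on empty lists, excluded by Pre_ (headD "" there)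
  let full : Int := (((grid.headD []).headD "").toList.length : Int)
  let half : Int := PySem.Int.floordiv full 2
  mvLoopA grid smudge full half (PySem.List.pyRange 1 full 1)

-- ===== PORT B =====
-- zip(*rows): truncating transpose, one column per step
def zipStar : List (List Char) → List (List Char)
  | [] => []
  | r :: rest =>
    if (r :: rest).any (·.isEmpty) then []
    else ((r :: rest).map (·.headD ' ')) :: zipStar ((r :: rest).map List.tail)
termination_by l => (l.headD []).length
decreasing_by
  rename_i h
  have hr : ¬ r.isEmpty := by
    intro hcon
    exact h (by simp only [List.any_eq_true]; exact ⟨r, List.mem_cons_self, hcon⟩)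
  cases r with
  | nil => simp at hr
  | cons c cs => simp

-- sum(c != d for c, d in zip(a, b))
def hamB (a b : List Char) : Int :=
  (a.zip b).foldl (fun n p => if p.1 ≠ p.2 then n + 1 else n) 0

-- 'for x in range(1, full): … return x' / 'return 0'
def mvLoopB (cols : List (List Char)) (target full : Int) : List Int → Int
  | [] => 0
  | x :: xs =>
    let lo := max 0 (2 * x - full)
    let diffs := (PySem.List.pyRange lo x 1).foldl
      (fun d j => d + hamB (PySem.List.pyGetD cols j []) (PySem.List.pyGetD cols (2 * x - 1 - j) [])) 0
    if diffs = target then x else mvLoopB cols target full xs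

def mirror_vertical_alt (grid : List (List String)) (smudge : Bool) : Int :=
  let full : Int := (((grid.headD []).headD "").toList.length : Int)
  if full < 2 then 0   -- no candidate axis exists
  else
    let cols := zipStar (grid.map (fun f => (f.headD "").toList))
    let target : Int := if smudge then 1 else 0
    mvLoopB cols target full (PySem.List.pyRange 1 full 1)

-- ===== PRECONDITION & SPEC =====
-- Pre_ excludes the empty grid and grids with an empty first row (A raises
-- IndexError on grid[0][0]); when the first string has length ≥ 2 it further
-- excludes grids containing an empty row list and non-rectangular grids, i.e.
-- grids in which some row's first string has a length different from the first
-- row's: there A either raises IndexError in its inner loop or returns a value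
-- produced by comparing accidental slice overlaps, a corner no caller of this
-- AoC mirror finder specifies.
def Pre_mirror_vertical (grid : List (List String)) (smudge : Bool) : Prop :=
  grid ≠ [] ∧ (grid.headD []) ≠ [] ∧
    (((grid.headD []).headD "").toList.length ≤ 1 ∨
      ∀ f ∈ grid, f ≠ [] ∧
        (f.headD "").toList.length = ((grid.headD []).headD "").toList.length)
instance (grid : List (List String)) (smudge : Bool) : Decidable (Pre_mirror_vertical grid smudge) := by
  unfold Pre_mirror_vertical; infer_instance

def pvWitness_mirror_vertical : List (List String) × Bool := ([["abba"], ["acca"]], false)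

def Spec_mirror_vertical (grid : List (List String)) (smudge : Bool) (out : Int) : Prop :=
  out = mirror_vertical_alt grid smudge
instance (grid : List (List String)) (smudge : Bool) (out : Int) : Decidable (Spec_mirror_vertical grid smudge out) := by
  unfold Spec_mirror_vertical; infer_instance

-- ===== CLAIM (what is proved, stated in full; the proofs are below) =====
def Claim_equal_mirror_vertical : Prop := ∀ (grid : List (List String)) (smudge : Bool), Dom_mirror_vertical grid smudge → Pre_mirror_vertical grid smudge → Spec_mirror_vertical grid smudge (mirror_vertical grid smudge)


-- ===== LEMMAS AND PROOFS =====

def indC (s : List Char) (j k : Nat) : Int := if s.getD j ' ' ≠ s.getD k ' ' then 1 else 0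
def winSum (s : List Char) (lo x : Nat) : Int :=
  ((List.range (x - lo)).map (fun i => indC s (lo + i) (2 * x - 1 - (lo + i)))).sum

theorem cnt_aux {α : Type} (p : α → Prop) [DecidablePred p] (l : List α) (d : Int) :
    l.foldl (fun d c => if p c then d + 1 else d) d
      = d + (l.map (fun c => if p c then (1 : Int) else 0)).sum := by
  induction l generalizing d with
  | nil => simp
  | cons a t ih =>
      simp only [List.foldl_cons, List.map_cons, List.sum_cons, ih]
      split_ifs <;> ring

theorem ham_aux (rows : List (List Char)) (j k : Nat) (a : Int) :
    List.foldl (fun x y => if y.getD j ' ' ≠ y.getD k ' ' then x + 1 else x) a rows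
      = a + (rows.map (fun s => indC s j k)).sum := by
  induction rows generalizing a with
  | nil => simp
  | cons r t ih =>
      simp only [List.foldl_cons, List.map_cons, List.sum_cons, ih, indC]
      split_ifs <;> ring

theorem ham_col (rows : List (List Char)) (j k : Nat) :
    hamB (rows.map (fun s => s.getD j ' ')) (rows.map (fun s => s.getD k ' '))
      = (rows.map (fun s => indC s j k)).sum := by
  unfold hamB
  rw [List.zip_map']
  rw [List.foldl_map]
  rw [show (fun (x : Int) (y : List Char) => if (y.getD j ' ', y.getD k ' ').1 ≠ (y.getD j ' ', y.getD k ' ').2 then x + 1 else x) = fun (x : Int) (y : List Char) => if y.getD j ' ' ≠ y.getD k ' ' then x + 1 else x from rfl]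
  rw [ham_aux]
  simp

theorem getD_tail' (s : List Char) (j : Nat) (d : Char) : s.tail.getD j d = s.getD (j + 1) d := by
  cases s <;> simp [List.getD]

theorem zipStar_eq (L : Nat) (rows : List (List Char)) (hne : rows ≠ [])
    (hl : ∀ s ∈ rows, s.length = L) :
    zipStar rows = (List.range L).map (fun j => rows.map (fun s => s.getD j ' ')) := by
  induction L generalizing rows with
  | zero =>
      obtain ⟨r, rest, rfl⟩ := List.exists_cons_of_ne_nil hne
      rw [zipStar]
      have : r.isEmpty := by
        have := hl r List.mem_cons_self
        simp [List.length_eq_zero_iff.mp this]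
      simp [List.any_cons, this]
  | succ L ih =>
      obtain ⟨r, rest, rfl⟩ := List.exists_cons_of_ne_nil hne
      rw [zipStar]
      have hnoe : ((r :: rest).any (·.isEmpty)) = false := by
        simp only [List.any_eq_false]
        intro s hs
        have := hl s hs
        simp [List.isEmpty_iff]
        intro hcon
        rw [hcon] at this; simp at this
      rw [hnoe]
      simp only [if_neg Bool.false_ne_true]
      rw [ih ((r :: rest).map List.tail) (by simp) (by
        intro s hs
        obtain ⟨t, ht, rfl⟩ := List.mem_map.mp hs
        have := hl t ht
        simp [List.length_tail, this])]
      rw [List.range_succ_eq_map]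
      simp only [List.map_cons, List.map_map]
      have h0 : ∀ (s : List Char), s.headD ' ' = s.getD 0 ' ' := by
        intro s; cases s <;> simp [List.getD]
      simp only [h0, Function.comp_def, getD_tail', Nat.succ_eq_add_one]

theorem sum_swap_int {α : Type} (l : List α) (n : Nat) (f : α → Nat → Int) :
    (l.map (fun a => ((List.range n).map (f a)).sum)).sum
      = ((List.range n).map (fun i => (l.map (fun a => f a i)).sum)).sum := by
  induction l with
  | nil => simp
  | cons a t ih =>
      simp only [List.map_cons, List.sum_cons, ih]
      rw [← List.sum_map_add]

theorem rowA_eq (L xn : Nat) (s : List Char) (hs : s.length = L)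
    (h1 : 1 ≤ xn) (h2 : xn < L) (d : Int) :
    mvRowDiffA (xn : Int) ((L / 2 : Nat) : Int) (L : Int) s d = d + winSum s (2 * xn - L) xn := by
  unfold mvRowDiffA winSum
  by_cases hx : 2 * xn ≤ L
  · have hle : ((xn : Int) ≤ ((L / 2 : Nat) : Int)) := by omega
    rw [if_pos hle]
    dsimp only
    simp only [PySem.List.slice_to_natCast, PySem.List.slice_natCast_add]
    have hlen : (s.take xn).length = xn := by simp; omega
    rw [hlen]
    rw [PySem.List.pyRange_zero_nat]
    rw [cnt_aux (fun c => PySem.List.pyGet? (s.take xn) c ≠ PySem.List.pyGet? ((s.drop xn).take xn).reverse c)]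
    rw [List.map_map]
    have hlo : 2 * xn - L = 0 := by omega
    rw [hlo]
    simp only [Nat.sub_zero, Nat.zero_add]
    refine congrArg (fun t => d + t) (congrArg (List.sum (α := Int)) (List.map_congr_left ?_))
    intro i hi
    rw [List.mem_range] at hi
    have hgl : PySem.List.pyGet? (s.take xn) (i : Int) = some (s[i]'(by omega)) := by
      rw [PySem.List.pyGet?_natCast]
      rw [List.getElem?_take_of_lt hi]
      exact List.getElem?_eq_getElem (by omega)
    have hinlen : ((s.drop xn).take xn).length = xn := by simp; omega
    have hgr : PySem.List.pyGet? ((s.drop xn).take xn).reverse (i : Int) = some (s[2*xn-1-i]'(by omega)) := by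
      rw [PySem.List.pyGet?_natCast]
      rw [List.getElem?_reverse (by rw [hinlen]; omega)]
      rw [hinlen]
      rw [List.getElem?_take_of_lt (by omega)]
      rw [List.getElem?_drop]
      rw [(show xn + (xn - 1 - i) = 2*xn-1-i by omega)]
      exact List.getElem?_eq_getElem (by omega)
    simp only [Function.comp_def]
    rw [hgl, hgr]
    unfold indC
    rw [List.getD_eq_getElem s ' ' (by omega), List.getD_eq_getElem s ' ' (by omega)]
    simp
  · have hgt : ¬((xn : Int) ≤ ((L / 2 : Nat) : Int)) := by omega
    rw [if_neg hgt]
    dsimp only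
    have hstart : ((xn : Int) - ((L : Int) - (xn : Int))) = (((2 * xn - L : Nat)) : Int) := by omega
    rw [hstart]
    rw [PySem.List.slice_natCast, PySem.List.slice_from_natCast]
    rw [(show xn - (2 * xn - L) = L - xn by omega)]
    have hlen : ((s.drop (2 * xn - L)).take (L - xn)).length = L - xn := by
      simp; omega
    rw [hlen]
    rw [PySem.List.pyRange_zero_nat]
    rw [cnt_aux (fun c => PySem.List.pyGet? ((s.drop (2 * xn - L)).take (L - xn)) c ≠ PySem.List.pyGet? (s.drop xn).reverse c)]
    rw [List.map_map]
    refine congrArg (fun t => d + t) (congrArg (List.sum (α := Int)) (List.map_congr_left ?_))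
    intro i hi
    rw [List.mem_range] at hi
    have hgl : PySem.List.pyGet? ((s.drop (2 * xn - L)).take (L - xn)) (i : Int)
        = some (s[(2 * xn - L) + i]'(by omega)) := by
      rw [PySem.List.pyGet?_natCast]
      rw [List.getElem?_take_of_lt (by omega)]
      rw [List.getElem?_drop]
      exact List.getElem?_eq_getElem (by omega)
    have hgr : PySem.List.pyGet? (s.drop xn).reverse (i : Int) = some (s[L - 1 - i]'(by omega)) := by
      rw [PySem.List.pyGet?_natCast]
      rw [List.getElem?_reverse (by simp; omega)]
      rw [(show (List.drop xn s).length - 1 - i = L - xn - 1 - i by simp; omega)]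
      rw [List.getElem?_drop]
      rw [(show xn + (L - xn - 1 - i) = L - 1 - i by omega)]
      exact List.getElem?_eq_getElem (by omega)
    simp only [Function.comp_def]
    rw [hgl, hgr]
    unfold indC
    rw [List.getD_eq_getElem s ' ' (by omega), List.getD_eq_getElem s ' ' (by omega)]
    have hidx : 2 * xn - 1 - (2 * xn - L + i) = L - 1 - i := by omega
    simp [hidx]

theorem perX_A (L xn : Nat) (grid : List (List String))
    (hl : ∀ f ∈ grid, ((f.headD "").toList.length = L))
    (h1 : 1 ≤ xn) (h2 : xn < L) :
    grid.foldl (fun d f => mvRowDiffA (xn : Int) ((L / 2 : Nat) : Int) (L : Int) (f.headD "").toList d) 0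
    = ((grid.map (fun f => (f.headD "").toList)).map (fun s => winSum s (2 * xn - L) xn)).sum := by
  rw [PySem.List.foldl_congr_mem grid _
    (fun d f => d + winSum (f.headD "").toList (2 * xn - L) xn) 0
    (by intro acc f hf; exact rowA_eq L xn _ (hl f hf) h1 h2 acc)]
  rw [PySem.List.foldl_add grid (fun f => winSum (f.headD "").toList (2 * xn - L) xn) 0]
  simp [List.map_map, Function.comp_def]

theorem perX_B (L xn : Nat) (rows : List (List Char)) (hne : rows ≠ [])
    (hl : ∀ s ∈ rows, s.length = L) (h1 : 1 ≤ xn) (h2 : xn < L) :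
    (PySem.List.pyRange (max 0 (2 * (xn : Int) - (L : Int))) (xn : Int) 1).foldl
      (fun d j => d + hamB (PySem.List.pyGetD (zipStar rows) j [])
        (PySem.List.pyGetD (zipStar rows) (2 * (xn : Int) - 1 - j) [])) 0
    = ((List.range (xn - (2 * xn - L))).map
        (fun i => (rows.map (fun s => indC s ((2 * xn - L) + i) (2 * xn - 1 - ((2 * xn - L) + i)))).sum)).sum := by
  rw [(show max 0 (2 * (xn : Int) - (L : Int)) = (((2 * xn - L : Nat)) : Int) by omega)]
  rw [PySem.List.pyRange_one]
  rw [(show (((xn : Int)) - ((2 * xn - L : Nat) : Int)).toNat = xn - (2 * xn - L) by omega)]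
  rw [List.foldl_map]
  rw [PySem.List.foldl_add]
  rw [zipStar_eq L rows hne hl]
  simp only [Int.zero_add]
  refine congrArg (List.sum (α := Int)) (List.map_congr_left ?_)
  intro i hi
  rw [List.mem_range] at hi
  rw [(show ((2 * xn - L : Nat) : Int) + (i : Int) = (((2 * xn - L) + i : Nat) : Int) by omega)]
  rw [(show 2 * ((xn : Nat) : Int) - 1 - (((2 * xn - L) + i : Nat) : Int) = ((2 * xn - 1 - ((2 * xn - L) + i) : Nat) : Int) by omega)]
  rw [PySem.List.pyGetD_natCast, PySem.List.pyGetD_natCast]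
  rw [PySem.List.getD_map_range _ L _ [] (by omega), PySem.List.getD_map_range _ L _ [] (by omega)]
  exact ham_col rows _ _

theorem perX_eq (L xn : Nat) (grid : List (List String)) (hne : grid ≠ [])
    (hl : ∀ f ∈ grid, ((f.headD "").toList.length = L))
    (h1 : 1 ≤ xn) (h2 : xn < L) :
    grid.foldl (fun d f => mvRowDiffA (xn : Int) ((L / 2 : Nat) : Int) (L : Int) (f.headD "").toList d) 0
    = (PySem.List.pyRange (max 0 (2 * (xn : Int) - (L : Int))) (xn : Int) 1).foldl
        (fun d j => d + hamB (PySem.List.pyGetD (zipStar (grid.map (fun f => (f.headD "").toList))) j [])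
          (PySem.List.pyGetD (zipStar (grid.map (fun f => (f.headD "").toList))) (2 * (xn : Int) - 1 - j) [])) 0 := by
  rw [perX_A L xn grid hl h1 h2]
  rw [perX_B L xn (grid.map (fun f => (f.headD "").toList)) (by simp [hne])
    (by intro s hs; obtain ⟨f, hf, rfl⟩ := List.mem_map.mp hs; exact hl f hf) h1 h2]
  unfold winSum
  rw [sum_swap_int]

theorem floordiv_two (L : Nat) : PySem.Int.floordiv (L : Int) 2 = ((L / 2 : Nat) : Int) := by
  rw [PySem.Int.floordiv_eq_iff_of_pos (by norm_num)]
  omega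

theorem loops_eq (grid : List (List String)) (smudge : Bool) (L : Nat) (hne : grid ≠ [])
    (hl : ∀ f ∈ grid, ((f.headD "").toList.length = L)) (xs : List Int)
    (hxs : ∀ x ∈ xs, ∃ xn : Nat, x = (xn : Int) ∧ 1 ≤ xn ∧ xn < L) :
    mvLoopA grid smudge (L : Int) ((L / 2 : Nat) : Int) xs
      = mvLoopB (zipStar (grid.map (fun f => (f.headD "").toList))) (if smudge then 1 else 0) (L : Int) xs := by
  induction xs with
  | nil => rfl
  | cons x xs ih =>
      obtain ⟨xn, rfl, hx1, hx2⟩ := hxs x List.mem_cons_self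
      rw [mvLoopA, mvLoopB]
      rw [perX_eq L xn grid hne hl hx1 hx2]
      rw [ih (fun y hy => hxs y (List.mem_cons_of_mem _ hy))]

theorem pvWitness_ok : Dom_mirror_vertical pvWitness_mirror_vertical.1 pvWitness_mirror_vertical.2 ∧ Pre_mirror_vertical pvWitness_mirror_vertical.1 pvWitness_mirror_vertical.2 := by
  constructor <;> decide

-- ===== VERDICT (by name: the statement is the Claim_ definition above) =====
theorem mirror_vertical_spec : Claim_equal_mirror_vertical := by
  intro grid smudge _hdom hpre
  obtain ⟨hne, hne0, hrest⟩ := hpre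
  unfold Spec_mirror_vertical mirror_vertical mirror_vertical_alt
  dsimp only
  by_cases hL : ((grid.headD []).headD "").toList.length ≤ 1
  · rw [if_pos (show ((((grid.headD []).headD "").toList.length : Nat) : Int) < 2 by omega)]
    rw [PySem.List.pyRange_one_eq_nil (show ((((grid.headD []).headD "").toList.length : Nat) : Int) ≤ 1 by omega)]
    rfl
  · rw [if_neg (show ¬ ((((grid.headD []).headD "").toList.length : Nat) : Int) < 2 by omega)]
    have hrows := hrest.resolve_left hL
    rw [floordiv_two]
    exact loops_eq grid smudge _ hne (fun f hf => (hrows f hf).2) _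
      (fun x hx => by
        rw [PySem.List.mem_pyRange_one] at hx
        exact ⟨x.toNat, by omega, by omega, by omega⟩)
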